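-- pv_equiv track=rewrite | github.com/Dengdengmx/ZTools-main | bio-engine/plugins/plugin_primer_designer.py | sliding_window_match
-- ===== SOURCE A (Python) =====
-- def reverse_complement(seq):
--     trans = str.maketrans('ATCGN', 'TAGCN')
--     return seq.upper().translate(trans)[::-1]
--
-- def sliding_window_match(template, query_seq, is_reverse=False):
--     search_seq = reverse_complement(query_seq) if is_reverse else query_seq.upper()
--     best_score = -1
--     best_idx = -1
--     best_mismatches = []
--     q_len = len(search_seq)
--     t_len = len(template)
--
--     for i in range(-q_len + 1, t_len):
--         start_t = max(0, i)
--         end_t = min(t_len, i + q_len)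
--         start_q = start_t - i
--         end_q = end_t - i
--
--         window = template[start_t:end_t]
--         query_window = search_seq[start_q:end_q]
--         matches = sum(1 for a, b in zip(window, query_window) if a == b)
--
--         if matches > best_score and matches >= 10:
--             best_score = matches
--             best_idx = i
--             mismatches = []
--             for j in range(q_len):
--                 if j < start_q or j >= end_q: mismatches.append(j)
--                 elif search_seq[j] != template[i + j]: mismatches.append(j)
--             best_mismatches = mismatches
--
--     if best_score < min(15, q_len * 0.5):
--         return -1, search_seq, [], 0
--     return best_idx, search_seq, best_mismatches, best_score
-- ===== SOURCE B (Python) =====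
-- def reverse_complement(seq):
--     comp = {'A': 'T', 'T': 'A', 'C': 'G', 'G': 'C', 'N': 'N'}
--     return ''.join(comp.get(c, c) for c in reversed(seq.upper()))
--
-- def sliding_window_match(template, query_seq, is_reverse=False):
--     search_seq = reverse_complement(query_seq) if is_reverse else query_seq.upper()
--     q_len = len(search_seq)
--     t_len = len(template)
--     # index template positions by character, then accumulate match counts per offset
--     pos = {}
--     for p, c in enumerate(template):
--         pos.setdefault(c, []).append(p)
--     counts = {}
--     for j, c in enumerate(search_seq):
--         for p in pos.get(c, []):
--             counts[p - j] = counts.get(p - j, 0) + 1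
--     best_score = -1
--     best_idx = -1
--     for i in range(-q_len + 1, t_len):
--         m = counts.get(i, 0)
--         if m > best_score and m >= 10:
--             best_score = m
--             best_idx = i
--     if 2 * best_score < min(30, q_len):
--         return -1, search_seq, [], 0
--     mismatches = [j for j in range(q_len)
--                   if not (0 <= best_idx + j < t_len and search_seq[j] == template[best_idx + j])]
--     return best_idx, search_seq, mismatches, best_score
-- ===== Notes on version B (the rewrite author's own statement) =====
-- stated objective: faster
-- what changed: Instead of re-scanning a slice-and-zip window for every offset and rebuilding the mismatch list at every improvement, B builds a character-to-positions index of the template once, accumulates the match count of every offset in one sparse cross-correlation pass over the query, picks the best offset from the counts, tests the threshold in integer arithmetic, and computes the mismatch list only once for the final best offset.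
import Mathlib
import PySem

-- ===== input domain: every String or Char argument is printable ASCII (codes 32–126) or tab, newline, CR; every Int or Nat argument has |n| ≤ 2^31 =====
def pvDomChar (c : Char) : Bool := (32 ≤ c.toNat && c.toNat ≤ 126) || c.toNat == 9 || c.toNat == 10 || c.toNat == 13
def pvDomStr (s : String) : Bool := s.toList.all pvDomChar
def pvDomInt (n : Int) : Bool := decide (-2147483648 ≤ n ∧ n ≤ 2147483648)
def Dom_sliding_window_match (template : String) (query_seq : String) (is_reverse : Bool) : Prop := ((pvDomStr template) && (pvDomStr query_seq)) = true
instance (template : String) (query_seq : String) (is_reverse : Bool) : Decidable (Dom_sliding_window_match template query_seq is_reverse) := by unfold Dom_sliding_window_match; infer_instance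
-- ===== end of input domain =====

-- B replaces A's per-offset slice-and-zip rescans by a character-position index whose sparse
-- cross-correlation accumulates the match count of every offset at once, computes the mismatch
-- list only once (for the final best offset) and tests the score threshold in integers.

-- ===== PORT A =====
-- str.maketrans('ATCGN', 'TAGCN') applied by str.translate: per-character map, others unchanged (exact)
def pvTransA (c : Char) : Char :=
  if c = 'A' then 'T' else if c = 'T' then 'A' else if c = 'C' then 'G'
  else if c = 'G' then 'C' else if c = 'N' then 'N' else c

def pvReverseComplement (seq : String) : String :=
  String.ofList (((PySem.Chars.upper seq.toList).map pvTransA).reverse)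

-- matches = sum(1 for a, b in zip(window, query_window) if a == b) at offset i
def pvMatchesA (t s : List Char) (i : Int) : Int :=
  let start_t := max 0 i
  let end_t := min (PySem.List.len t) (i + PySem.List.len s)
  let start_q := start_t - i
  let end_q := end_t - i
  let window := PySem.List.slice t (some start_t) (some end_t)
  let query_window := PySem.List.slice s (some start_q) (some end_q)
  ((window.zip query_window).map (fun p => if p.1 = p.2 then (1 : Int) else 0)).sum

-- the inner 'for j in range(q_len)' mismatch loop of A at offset i
def pvMismA (t s : List Char) (i : Int) : List Int :=
  let start_q := max 0 i - i
  let end_q := min (PySem.List.len t) (i + PySem.List.len s) - i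
  (PySem.List.pyRange 0 (PySem.List.len s)).foldl (fun acc j =>
    if j < start_q ∨ j ≥ end_q then acc ++ [j]
    else if PySem.List.pyGetD s j ' ' ≠ PySem.List.pyGetD t (i + j) ' ' then acc ++ [j]
    else acc) []

-- one iteration of A's sliding-window loop (state: best_score, best_idx, best_mismatches)
def pvStepA (t s : List Char) (st : Int × Int × List Int) (i : Int) : Int × Int × List Int :=
  let mtc := pvMatchesA t s i
  if mtc > st.1 ∧ mtc ≥ 10 then (mtc, i, pvMismA t s i) else st

def sliding_window_match (template : String) (query_seq : String) (is_reverse : Bool) : Int × String × List Int × Int :=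
  let search_seq := if is_reverse then pvReverseComplement query_seq else PySem.Str.upper query_seq
  let s := search_seq.toList
  let t := template.toList
  let q_len : Int := PySem.List.len s
  let t_len : Int := PySem.List.len t
  let st := (PySem.List.pyRange (-q_len + 1) t_len).foldl (pvStepA t s) (-1, -1, [])
  -- 'best_score < min(15, q_len * 0.5)' ported over ℚ: both sides are exactly representable floats
  if (st.1 : ℚ) < min 15 ((q_len : ℚ) * (1/2)) then (-1, search_seq, [], 0)
  else (st.2.1, search_seq, st.2.2, st.1)

-- ===== PORT B =====
def pvCompDict : PySem.Dict Char Char :=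
  PySem.Dict.ofList [('A', 'T'), ('T', 'A'), ('C', 'G'), ('G', 'C'), ('N', 'N')]

def pvReverseComplementAlt (seq : String) : String :=
  String.ofList ((PySem.Chars.upper seq.toList).reverse.map (fun c => pvCompDict.getD c c))

-- pos: template positions indexed by character (pos.setdefault(c, []).append(p))
def pvPos (t : List Char) : PySem.Dict Char (List Int) :=
  (PySem.List.enumerate t).foldl (fun d pc => d.modify pc.2 [] (· ++ [pc.1])) PySem.Dict.empty

-- counts: match count per offset, accumulated from equal-character (position, query-index) pairs
def pvCounts (t s : List Char) : PySem.Dict Int Int :=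
  (PySem.List.enumerate s).foldl (fun d jc =>
    ((pvPos t).getD jc.2 []).foldl (fun d p => d.insert (p - jc.1) (d.getD (p - jc.1) 0 + 1)) d)
    PySem.Dict.empty

-- one iteration of B's best-offset scan (state: best_score, best_idx)
def pvStepB (counts : PySem.Dict Int Int) (st : Int × Int) (i : Int) : Int × Int :=
  let m := counts.getD i 0
  if m > st.1 ∧ m ≥ 10 then (m, i) else st

-- B's final mismatch comprehension at offset i
def pvMismB (t s : List Char) (i : Int) : List Int :=
  (PySem.List.pyRange 0 (PySem.List.len s)).filter (fun j =>
    !(decide (0 ≤ i + j) && decide (i + j < PySem.List.len t)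
      && (PySem.List.pyGetD s j ' ' == PySem.List.pyGetD t (i + j) ' ')))

def sliding_window_match_alt (template : String) (query_seq : String) (is_reverse : Bool) : Int × String × List Int × Int :=
  let search_seq := if is_reverse then pvReverseComplementAlt query_seq else PySem.Str.upper query_seq
  let s := search_seq.toList
  let t := template.toList
  let q_len : Int := PySem.List.len s
  let t_len : Int := PySem.List.len t
  let st := (PySem.List.pyRange (-q_len + 1) t_len).foldl (pvStepB (pvCounts t s)) (-1, -1)
  if 2 * st.1 < min 30 q_len then (-1, search_seq, [], 0)
  else (st.2, search_seq, pvMismB t s st.2, st.1)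

-- ===== PRECONDITION & SPEC =====
def Spec_sliding_window_match (template : String) (query_seq : String) (is_reverse : Bool) (out : Int × String × List Int × Int) : Prop := out = sliding_window_match_alt template query_seq is_reverse
instance (template : String) (query_seq : String) (is_reverse : Bool) (out : Int × String × List Int × Int) : Decidable (Spec_sliding_window_match template query_seq is_reverse out) := by unfold Spec_sliding_window_match; infer_instance

-- ===== CLAIM (what is proved, stated in full; the proofs are below) =====
def Claim_equal_sliding_window_match : Prop := ∀ (template : String) (query_seq : String) (is_reverse : Bool), Dom_sliding_window_match template query_seq is_reverse → Spec_sliding_window_match template query_seq is_reverse (sliding_window_match template query_seq is_reverse)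

-- ===== LEMMAS AND PROOFS =====

-- the common per-offset match count: number of query positions j aligned to an equal template char
def pvCnt (t s : List Char) (i : Int) : Int :=
  ((PySem.List.pyRange 0 (PySem.List.len s)).map (fun j =>
    if 0 ≤ i + j ∧ i + j < PySem.List.len t ∧ PySem.List.pyGetD t (i + j) ' ' = PySem.List.pyGetD s j ' '
    then (1 : Int) else 0)).sum

-- the two reverse-complement character maps agree
lemma pvComp_eq_trans (c : Char) : pvCompDict.getD c c = pvTransA c := by
  have h : pvCompDict = PySem.Dict.mk [('A', 'T'), ('T', 'A'), ('C', 'G'), ('G', 'C'), ('N', 'N')] := by decide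
  by_cases h1 : c = 'A'; · subst h1; decide
  by_cases h2 : c = 'T'; · subst h2; decide
  by_cases h3 : c = 'C'; · subst h3; decide
  by_cases h4 : c = 'G'; · subst h4; decide
  by_cases h5 : c = 'N'; · subst h5; decide
  rw [h, pvTransA]
  simp [PySem.Dict.getD_eq_get?_getD, h1, h2, h3, h4, h5,
    Ne.symm h1, Ne.symm h2, Ne.symm h3, Ne.symm h4, Ne.symm h5, PySem.Dict.get?]

-- the two search strings agree
lemma pvSearch_eq (query_seq : String) (is_reverse : Bool) :
    (if is_reverse then pvReverseComplementAlt query_seq else PySem.Str.upper query_seq)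
      = (if is_reverse then pvReverseComplement query_seq else PySem.Str.upper query_seq) := by
  cases is_reverse
  · rfl
  · simp only [if_pos, pvReverseComplementAlt, pvReverseComplement, pvComp_eq_trans, List.map_reverse]

-- pos.getD c [] lists exactly the template positions holding character c, in order
lemma pvPos_getD (t : List Char) (c : Char) :
    (pvPos t).getD c [] =
      (PySem.List.pyRange 0 (PySem.List.len t)).filter (fun p => PySem.List.pyGetD t p ' ' == c) := by
  rw [pvPos, PySem.List.enumerate_eq_map_pyRange t ' ', List.foldl_map]
  have h : (PySem.List.pyRange 0 (PySem.List.len t)).foldl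
      (fun (d : PySem.Dict Char (List Int)) j => d.modify (j, PySem.List.pyGetD t j ' ').2 [] (· ++ [(j, PySem.List.pyGetD t j ' ').1])) PySem.Dict.empty
    = ((PySem.List.pyRange 0 (PySem.List.len t)).map (fun j => (PySem.List.pyGetD t j ' ', j))).foldl
      (fun d p => d.modify p.1 [] (· ++ [p.2])) PySem.Dict.empty := by
    rw [List.foldl_map]
  rw [h, PySem.Dict.getD_foldl_modify_append]
  simp [List.filter_map, Function.comp_def]

lemma pvCount_filter_range (t : List Char) (c : Char) (v : Int) :
    (((PySem.List.pyRange 0 (PySem.List.len t)).filter (fun p => PySem.List.pyGetD t p ' ' == c)).count v : Int)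
      = if 0 ≤ v ∧ v < PySem.List.len t ∧ PySem.List.pyGetD t v ' ' = c then 1 else 0 := by
  by_cases hc : PySem.List.pyGetD t v ' ' = c
  · rw [List.count_filter (by simpa using hc)]
    by_cases hv : 0 ≤ v ∧ v < PySem.List.len t
    · rw [List.count_eq_one_of_mem (PySem.List.nodup_pyRange_one 0 _)
        (PySem.List.mem_pyRange_one.mpr hv)]
      obtain ⟨hv1, hv2⟩ := hv
      rw [PySem.List.len_eq] at hv2
      simp [hv1, hv2, hc]
    · rw [List.count_eq_zero_of_not_mem (fun hm => hv (PySem.List.mem_pyRange_one.mp hm))]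
      have hn : ¬ (0 ≤ v ∧ v < PySem.List.len t ∧ PySem.List.pyGetD t v ' ' = c) :=
        fun h => hv ⟨h.1, h.2.1⟩
      rw [if_neg hn]
      simp
  · rw [List.count_eq_zero_of_not_mem]
    · simp [hc]
    · intro hm
      exact hc (by simpa using (List.of_mem_filter hm))

lemma pvInner_fold (j : Int) (ks : List Int) (d : PySem.Dict Int Int) (i : Int) :
    (ks.foldl (fun d p => d.insert (p - j) (d.getD (p - j) 0 + 1)) d).getD i 0
      = d.getD i 0 + (ks.count (i + j) : Int) := by
  have h : (ks.foldl (fun d p => d.insert (p - j) (d.getD (p - j) 0 + 1)) d)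
      = ((ks.map (fun p => p - j)).foldl (fun d x => d.insert x (d.getD x 0 + 1)) d) := by
    rw [List.foldl_map]
  rw [h, PySem.Dict.getD_foldl_insert_add_one]
  congr 2
  have hcm := List.count_map_of_injective (l := ks) (f := fun p : Int => p - j) (x := i + j)
    (fun a b hab => by simp only at hab; omega)
  rw [← hcm]
  congr 1
  omega

lemma pvCounts_fold (t : List Char) (l : List (Int × Char)) (d : PySem.Dict Int Int) (i : Int) :
    (l.foldl (fun d jc =>
        ((pvPos t).getD jc.2 []).foldl (fun d p => d.insert (p - jc.1) (d.getD (p - jc.1) 0 + 1)) d) d).getD i 0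
      = d.getD i 0 + ((l.map (fun jc =>
          if 0 ≤ i + jc.1 ∧ i + jc.1 < PySem.List.len t ∧ PySem.List.pyGetD t (i + jc.1) ' ' = jc.2
          then (1 : Int) else 0)).sum) := by
  induction l generalizing d with
  | nil => simp
  | cons jc l ih =>
    rw [List.foldl_cons, ih, pvInner_fold, pvPos_getD, pvCount_filter_range,
      List.map_cons, List.sum_cons]
    ring
lemma pvCounts_getD (t s : List Char) (i : Int) :
    (pvCounts t s).getD i 0 = pvCnt t s i := by
  rw [pvCounts, PySem.List.enumerate_eq_map_pyRange s ' ', List.foldl_map]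
  have h := pvCounts_fold t ((PySem.List.pyRange 0 (PySem.List.len s)).map (fun j => (j, PySem.List.pyGetD s j ' '))) PySem.Dict.empty i
  rw [List.foldl_map] at h
  rw [h, pvCnt]
  simp [List.map_map, Function.comp_def]

-- (pvCounts_getD proved above via pvCounts_fold)

-- A's slice-zip match count is the common match count (for offsets A's loop visits)
lemma pvWindow_eq (u : List Char) (x y : Int) (hx : 0 ≤ x) (hxy : x ≤ y) (hy : y ≤ u.length) :
    PySem.List.slice u (some x) (some y) = (List.range (y - x).toNat).map (fun k => u.getD (x.toNat + k) ' ') := by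
  rw [PySem.List.slice_toNat u hx (le_trans hx hxy)]
  apply List.ext_getElem
  · simp [List.length_take, List.length_drop]; omega
  · intro k h1 h2
    simp only [List.getElem_take, List.getElem_drop, List.getElem_map, List.getElem_range]
    rw [List.getD_eq_getElem u ' ' (by simp at h1 ⊢; omega)]

lemma pvMatchesA_eq (t s : List Char) (i : Int)
    (h1 : -(PySem.List.len s) + 1 ≤ i) (h2 : i < PySem.List.len t) :
    pvMatchesA t s i = pvCnt t s i := by
  simp only [PySem.List.len_eq] at h1 h2
  simp only [pvMatchesA, pvCnt]
  generalize hst : max 0 i = stI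
  generalize hen : min (PySem.List.len t) (i + PySem.List.len s) = enI
  have hst1 : 0 ≤ stI := hst ▸ le_max_left _ _
  have hst2 : i ≤ stI := hst ▸ le_max_right _ _
  have hst3 : stI = 0 ∨ stI = i := hst ▸ max_choice 0 i
  have hen1 : enI ≤ (t.length : Int) := by
    rw [← hen, PySem.List.len_eq]; exact min_le_left _ _
  have hen2 : enI ≤ i + s.length := by
    rw [← hen]
    calc min (PySem.List.len t) (i + PySem.List.len s) ≤ i + PySem.List.len s := min_le_right _ _
      _ = i + s.length := by rw [PySem.List.len_eq]
  have hen3 : enI = (t.length : Int) ∨ enI = i + s.length := by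
    rcases min_choice (PySem.List.len t) (i + PySem.List.len s) with h | h <;>
      rw [← hen, h, PySem.List.len_eq] <;> [left; right] <;> rfl
  have hse : stI ≤ enI := by omega
  have hwin := pvWindow_eq t stI enI hst1 hse hen1
  have hq := pvWindow_eq s (stI - i) (enI - i) (by omega) (by omega) (by omega)
  have hLq : (enI - i) - (stI - i) = enI - stI := by ring
  rw [hLq] at hq
  rw [hwin, hq, List.zip_map', List.map_map]
  rw [PySem.List.pyRange_one_append 0 (stI - i) (PySem.List.len s)
    (by omega) (by rw [PySem.List.len_eq]; omega)]
  rw [PySem.List.pyRange_one_append (stI - i) (enI - i) (PySem.List.len s)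
    (by omega) (by rw [PySem.List.len_eq]; omega)]
  rw [List.map_append, List.map_append, List.sum_append, List.sum_append]
  have hz1 : ((PySem.List.pyRange 0 (stI - i)).map (fun j =>
      if 0 ≤ i + j ∧ i + j < PySem.List.len t ∧ PySem.List.pyGetD t (i + j) ' ' = PySem.List.pyGetD s j ' '
      then (1 : Int) else 0)).sum = 0 := by
    apply List.sum_eq_zero
    intro x hx
    obtain ⟨j, hj, rfl⟩ := List.mem_map.mp hx
    obtain ⟨hj1, hj2⟩ := PySem.List.mem_pyRange_one.mp hj
    have hnot : ¬ (0 ≤ i + j) := by omega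
    simp [hnot]
  have hz3 : ((PySem.List.pyRange (enI - i) (PySem.List.len s)).map (fun j =>
      if 0 ≤ i + j ∧ i + j < PySem.List.len t ∧ PySem.List.pyGetD t (i + j) ' ' = PySem.List.pyGetD s j ' '
      then (1 : Int) else 0)).sum = 0 := by
    apply List.sum_eq_zero
    intro x hx
    obtain ⟨j, hj, rfl⟩ := List.mem_map.mp hx
    obtain ⟨hj1, hj2⟩ := PySem.List.mem_pyRange_one.mp hj
    rw [PySem.List.len_eq] at hj2
    have hnot : ¬ (i + j < (t.length : Int)) := by omega
    simp [hnot]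
  rw [hz1, hz3, zero_add, add_zero]
  rw [PySem.List.pyRange_one (stI - i) (enI - i)]
  have hLL : ((enI - i) - (stI - i)).toNat = (enI - stI).toNat := by omega
  rw [hLL, List.map_map]
  apply congrArg List.sum
  apply List.map_congr_left
  intro k hk
  have hkL : (k : Int) < enI - stI := by
    have := List.mem_range.mp hk
    omega
  have e1 : stI - i + (k : Int) = (((stI - i).toNat + k : Nat) : Int) := by push_cast; omega
  have e2 : i + (stI - i + (k : Int)) = ((stI.toNat + k : Nat) : Int) := by push_cast; omega
  simp only [Function.comp_def]
  rw [e2, e1]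
  have c1 : (0 : Int) ≤ ((stI.toNat + k : Nat) : Int) := by positivity
  have c2 : ((stI.toNat + k : Nat) : Int) < PySem.List.len t := by
    rw [PySem.List.len_eq]; push_cast; omega
  simp only [PySem.List.pyGetD_natCast, c1, c2, true_and]

-- A's mismatch loop and B's mismatch comprehension agree at every offset
lemma pvIfIf {α : Type} (p q : Prop) [Decidable p] [Decidable q] (x acc : α) :
    (if p then x else if q then x else acc) = if p ∨ q then x else acc := by
  by_cases hp : p <;> by_cases hq : q <;> simp [hp, hq]

lemma pvMism_eq (t s : List Char) (i : Int) : pvMismA t s i = pvMismB t s i := by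
  rw [pvMismA, pvMismB]
  rw [PySem.List.foldl_congr_mem _ _ (fun acc j =>
      if (j < max 0 i - i ∨ j ≥ min (PySem.List.len t) (i + PySem.List.len s) - i) ∨
        PySem.List.pyGetD s j ' ' ≠ PySem.List.pyGetD t (i + j) ' '
      then acc ++ [j] else acc) []
    (fun acc j _ => pvIfIf _ _ _ _)]
  rw [PySem.List.foldl_append_ite_eq_filter, List.nil_append]
  apply List.filter_congr
  intro j hj
  obtain ⟨hj1, hj2⟩ := PySem.List.mem_pyRange_one.mp hj
  rw [PySem.List.len_eq] at hj2
  have hiff : (j < max 0 i - i ∨ j ≥ min (PySem.List.len t) (i + PySem.List.len s) - i)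
      ↔ ¬ (0 ≤ i + j ∧ i + j < PySem.List.len t) := by
    rw [PySem.List.len_eq, PySem.List.len_eq]
    rcases min_choice ((t.length : Int)) (i + (s.length : Int)) with hm | hm <;> rw [hm] <;>
      [skip; (have h1 := min_le_left ((t.length : Int)) (i + (s.length : Int)); rw [hm] at h1)] <;>
      omega
  rw [Bool.eq_iff_iff]
  simp only [decide_eq_true_eq, Bool.not_eq_true', Bool.and_eq_false_iff, beq_eq_false_iff_ne,
    decide_eq_false_iff_not, ne_eq, hiff]
  tauto

-- the integer threshold test is the float threshold test
lemma pvThr_iff (bs q : Int) :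
    ((bs : ℚ) < min 15 ((q : ℚ) * (1/2))) ↔ (2 * bs < min 30 q) := by
  rw [lt_min_iff, lt_min_iff]
  constructor
  · rintro ⟨hx, hy⟩
    constructor
    · have : bs < 15 := by exact_mod_cast hx
      omega
    · have : (2 * bs : ℚ) < q := by linarith
      exact_mod_cast this
  · rintro ⟨hx, hy⟩
    constructor
    · have : bs < 15 := by omega
      exact_mod_cast this
    · have : (2 * bs : ℚ) < q := by exact_mod_cast hy
      linarith

-- the two best-tracking folds stay in lockstep; A's carried mismatch list is B's at the best offset
lemma pvFold_rel (t s : List Char) (l : List Int)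
    (h : ∀ i ∈ l, pvMatchesA t s i = (pvCounts t s).getD i 0) :
    ∀ (p : Int × Int) (mm : List Int), (0 ≤ p.1 → mm = pvMismB t s p.2) →
      (l.foldl (pvStepA t s) (p.1, p.2, mm)).1 = (l.foldl (pvStepB (pvCounts t s)) p).1 ∧
      (l.foldl (pvStepA t s) (p.1, p.2, mm)).2.1 = (l.foldl (pvStepB (pvCounts t s)) p).2 ∧
      (0 ≤ (l.foldl (pvStepA t s) (p.1, p.2, mm)).1 →
        (l.foldl (pvStepA t s) (p.1, p.2, mm)).2.2
          = pvMismB t s (l.foldl (pvStepA t s) (p.1, p.2, mm)).2.1) := by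
  induction l with
  | nil =>
    intro p mm hmm
    exact ⟨rfl, rfl, hmm⟩
  | cons i l ih =>
    intro p mm hmm
    have hm := h i (List.mem_cons_self ..)
    have hrest : ∀ j ∈ l, pvMatchesA t s j = (pvCounts t s).getD j 0 :=
      fun j hj => h j (List.mem_cons_of_mem _ hj)
    simp only [List.foldl_cons, pvStepA, pvStepB, hm]
    split_ifs with hcond
    · exact ih hrest ((pvCounts t s).getD i 0, i) (pvMismA t s i) (fun _ => pvMism_eq t s i)
    · exact ih hrest p mm hmm

-- ===== VERDICT (by name: the statement is the Claim_ definition above) =====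
theorem sliding_window_match_spec : Claim_equal_sliding_window_match := by
  intro template query_seq is_reverse _
  unfold Spec_sliding_window_match
  simp only [sliding_window_match, sliding_window_match_alt]
  rw [pvSearch_eq]
  generalize (if is_reverse then pvReverseComplement query_seq else PySem.Str.upper query_seq) = S
  generalize hs : S.toList = s
  generalize ht : template.toList = t
  have hmem : ∀ i ∈ PySem.List.pyRange (-(PySem.List.len s) + 1) (PySem.List.len t),
      pvMatchesA t s i = (pvCounts t s).getD i 0 := by
    intro i hi
    obtain ⟨hi1, hi2⟩ := PySem.List.mem_pyRange_one.mp hi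
    rw [pvMatchesA_eq t s i (by omega) hi2, pvCounts_getD]
  obtain ⟨hA1, hA2, hA3⟩ := pvFold_rel t s _ hmem (-1, -1) [] (by intro h; exact absurd h (by norm_num))
  rw [hA1]
  by_cases hth : 2 * ((PySem.List.pyRange (-(PySem.List.len s) + 1) (PySem.List.len t)).foldl
      (pvStepB (pvCounts t s)) (-1, -1)).1 < min 30 (PySem.List.len s)
  · rw [if_pos hth, if_pos ((pvThr_iff _ _).mpr hth)]
  · rw [if_neg hth, if_neg (fun hq => hth ((pvThr_iff _ _).mp hq))]
    have hge : 0 ≤ ((PySem.List.pyRange (-(PySem.List.len s) + 1) (PySem.List.len t)).foldl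
        (pvStepB (pvCounts t s)) (-1, -1)).1 := by
      have hlen : 0 ≤ PySem.List.len s := by rw [PySem.List.len_eq]; positivity
      omega
    rw [hA2, hA3 (hA1 ▸ hge), hA2]
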